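-- pv_equiv track=rewrite | github.com/ASSERT-KTH/C4B_APR | data_directory/2604_problem_id/7262_author_id/Accepted.py | f
-- ===== SOURCE A (Python) =====
-- def f(a):
--     s = 0
--     k = 0
--     while a > 0:
--         k += 1
--         s += a % 10
--         a //= 10
--     return s, k
-- ===== SOURCE B (Python) =====
-- def f(a):
--     if a <= 0:
--         return (0, 0)
--     t = str(a)
--     return (sum(int(c) for c in t), len(t))
-- ===== Notes on version B (the rewrite author's own statement) =====
-- stated objective: idiomatic
-- what changed: B reads the digits from the decimal string representation (sum/len over str(a)) instead of A's arithmetic peeling loop with % and //.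
import Mathlib
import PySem

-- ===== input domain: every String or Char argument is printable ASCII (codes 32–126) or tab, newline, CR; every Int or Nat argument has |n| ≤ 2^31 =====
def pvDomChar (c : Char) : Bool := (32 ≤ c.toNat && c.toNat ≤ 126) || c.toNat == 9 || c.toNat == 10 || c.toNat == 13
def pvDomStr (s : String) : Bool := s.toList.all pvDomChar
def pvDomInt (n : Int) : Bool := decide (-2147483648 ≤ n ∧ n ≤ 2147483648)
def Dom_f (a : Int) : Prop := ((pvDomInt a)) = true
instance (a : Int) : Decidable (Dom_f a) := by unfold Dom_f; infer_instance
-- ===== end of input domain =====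

-- B computes the digit sum and digit count from the decimal string str(a) instead of A's %/// peeling loop (idiomatic, not faster).

-- ===== PORT A =====
-- the while loop of A, state (a, s, k)
def fLoop (a s k : Int) : Int × Int :=
  if 0 < a then
    fLoop (PySem.Int.floordiv a 10) (s + PySem.Int.mod a 10) (k + 1)
  else (s, k)
termination_by a.toNat
decreasing_by
  rw [PySem.Int.floordiv_eq_ediv_of_pos (by omega : (0:Int) < 10)]
  omega

def f (a : Int) : Int × Int := fLoop a 0 0

-- ===== PORT B =====
def f_alt (a : Int) : Int × Int :=
  if a ≤ 0 then (0, 0)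
  else
    -- int(c) on a single decimal digit character is its code minus 48; exact on the digits of str(a)
    (((PySem.Int.toChars a).map (fun c => (c.toNat : Int) - 48)).sum,
     ((PySem.Int.toChars a).length : Int))

-- ===== PRECONDITION & SPEC =====
def Spec_f (a : Int) (out : Int × Int) : Prop := out = f_alt a
instance (a : Int) (out : Int × Int) : Decidable (Spec_f a out) := by unfold Spec_f; infer_instance

-- ===== CLAIM (what is proved, stated in full; the proofs are below) =====
def Claim_equal_f : Prop := ∀ (a : Int), Dom_f a → Spec_f a (f a)

-- ===== LEMMAS AND PROOFS =====

lemma toDigitsCore_eq (fuel : ℕ) : ∀ (n : ℕ) (ds : List Char), 0 < n → n < fuel →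
    Nat.toDigitsCore 10 fuel n ds = (Nat.digits 10 n).reverse.map Nat.digitChar ++ ds := by
  induction fuel with
  | zero => intro n ds h1 h2; omega
  | succ fuel ih =>
    intro n ds h1 h2
    rw [Nat.toDigitsCore]
    rw [Nat.digits_def' (by norm_num : 1 < 10) h1]
    by_cases h : n / 10 = 0
    · simp [h, Nat.digits_zero]
    · have hlt : n / 10 < fuel := by
        have := Nat.div_lt_self h1 (by norm_num : 1 < 10); omega
      simp only [h, if_false]
      rw [ih (n / 10) _ (Nat.pos_of_ne_zero h) hlt]
      simp

lemma toChars_pos (a : Int) (h : 0 < a) :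
    PySem.Int.toChars a = (Nat.digits 10 a.toNat).reverse.map Nat.digitChar := by
  have hn : ¬ a < 0 := by omega
  have h1 : 0 < a.toNat := by omega
  simp only [PySem.Int.toChars, hn, if_false, Nat.toDigits]
  rw [toDigitsCore_eq (a.toNat + 1) a.toNat [] h1 (by omega)]
  simp

lemma digitChar_toNat (d : ℕ) (h : d < 10) : (Nat.digitChar d).toNat = d + 48 := by
  interval_cases d <;> decide

lemma fLoop_eq (n : ℕ) : ∀ (s k : Int), 0 < n →
    fLoop (n : Int) s k =
      (s + ((Nat.digits 10 n).map Int.ofNat).sum,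
       k + (Nat.digits 10 n).length) := by
  induction n using Nat.strong_induction_on with
  | _ n ih =>
    intro s k h
    rw [fLoop]
    have hpos : (0:Int) < (n : Int) := by exact_mod_cast h
    rw [if_pos hpos]
    rw [PySem.Int.floordiv_eq_ediv_of_pos (by norm_num : (0:Int) < 10),
        PySem.Int.mod_eq_emod_of_pos (by norm_num : (0:Int) < 10)]
    have hdiv : (n : Int) / 10 = ((n / 10 : ℕ) : Int) := by omega
    have hmod : (n : Int) % 10 = ((n % 10 : ℕ) : Int) := by omega
    rw [hdiv, hmod, Nat.digits_def' (by norm_num : 1 < 10) h]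
    by_cases hz : n / 10 = 0
    · rw [hz]
      rw [fLoop]
      simp [Nat.digits_zero]
    · rw [ih (n / 10) (Nat.div_lt_self h (by norm_num)) _ _ (Nat.pos_of_ne_zero hz)]
      simp only [List.map_cons, List.sum_cons, List.length_cons]
      rw [Prod.mk.injEq]
      refine ⟨by simp only [Int.ofNat_eq_natCast]; ring, by push_cast; ring⟩

-- ===== VERDICT (by name: the statement is the Claim_ definition above) =====
theorem f_spec : Claim_equal_f := by
  intro a _
  unfold Spec_f f f_alt
  by_cases h : a ≤ 0
  · rw [fLoop, if_neg (by omega)]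
    simp [h]
  · rw [not_le] at h
    have ha : (a.toNat : Int) = a := Int.toNat_of_nonneg (by omega)
    rw [if_neg (by omega)]
    rw [← ha, fLoop_eq a.toNat 0 0 (by omega)]
    rw [ha, toChars_pos a h]
    have hmap : ((Nat.digits 10 a.toNat).reverse.map Nat.digitChar).map
        (fun c => (c.toNat : Int) - 48) =
        (Nat.digits 10 a.toNat).reverse.map Int.ofNat := by
      rw [List.map_map]
      apply List.map_congr_left
      intro d hd
      have hd10 : d < 10 := Nat.digits_lt_base (by norm_num) (List.mem_reverse.mp hd)
      simp [Function.comp, digitChar_toNat d hd10]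
    rw [hmap]
    simp
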